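-- pv_equiv track=rewrite | github.com/arkilpatel/mcgill-nlp.github.io | src/python/__init__.py | parse_issue_body
-- ===== SOURCE A (Python) =====
-- def parse_issue_body(body):
--     """
--     Parse the body of the issue and return a dictionary of the parsed data.
--     """
--     parsed = {}
--     k = None
--
--     for line in body.split("\n"):
--         if line.startswith("###"):
--             k = line.removeprefix("###").strip().lower().replace(" ", "_")
--             parsed[k] = ""
--         else:
--             if k is not None:
--                 parsed[k] += line.strip()
--
--     return parsed
-- ===== SOURCE B (Python) =====
-- def _sections(lines):
--     """Recursively split the lines into (key, joined-content) section pairs."""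
--     if not lines:
--         return []
--     first, rest = lines[0], lines[1:]
--     if not first.startswith("###"):
--         return _sections(rest)  # line before the first header: skipped
--     key = first.removeprefix("###").strip().lower().replace(" ", "_")
--     end = next((i for i, l in enumerate(rest) if l.startswith("###")), len(rest))
--     value = "".join(l.strip() for l in rest[:end])
--     return [(key, value)] + _sections(rest[end:])
--
--
-- def parse_issue_body(body):
--     """
--     Parse the body of the issue and return a dictionary of the parsed data.
--     """
--     parsed = {}
--     for key, value in _sections(body.split("\n")):
--         parsed[key] = value  # last duplicate wins, first-seen position kept
--     return parsed
-- ===== Notes on version B (the rewrite author's own statement) =====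
-- stated objective: alternative
-- what changed: A's stateful single pass (a running current-key plus in-place dict string concatenation per line) is replaced by a recursive block splitter: locate the next header, slice out the section's content lines, join them, recurse on the remainder, and materialize the dict with one assignment per section (last duplicate wins, first-seen position kept).
import Mathlib
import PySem

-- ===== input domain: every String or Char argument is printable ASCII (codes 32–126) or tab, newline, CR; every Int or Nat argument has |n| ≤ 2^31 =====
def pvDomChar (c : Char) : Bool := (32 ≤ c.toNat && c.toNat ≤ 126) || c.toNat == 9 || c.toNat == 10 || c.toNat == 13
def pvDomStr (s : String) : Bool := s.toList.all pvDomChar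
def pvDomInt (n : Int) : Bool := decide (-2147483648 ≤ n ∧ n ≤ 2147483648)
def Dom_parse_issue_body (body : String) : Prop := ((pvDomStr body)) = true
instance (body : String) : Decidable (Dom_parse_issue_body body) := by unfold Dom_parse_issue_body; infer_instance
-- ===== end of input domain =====

-- B replaces A's stateful per-line dict-accumulating loop by a recursive block splitter
-- (find the next header, slice out the section, recurse); same return value ('alternative', no speed claim).

-- shared helper: str.removeprefix(p)  (exact: drop p if it is a prefix, else unchanged)
def pvRemovePrefix (s p : String) : String :=
  if PySem.Str.startswith s p then PySem.Str.slice s (some (PySem.Str.len p)) none else s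

-- shared helper: the key computed for a '###' header line (identical expression in A and B)
def pvHeaderKey (line : String) : String :=
  PySem.Str.replace (PySem.Str.lower (PySem.Str.strip (pvRemovePrefix line "###"))) " " "_"

-- ===== PORT A =====
-- A's single loop: dict + current key, 'parsed[k] = ""' on a header, 'parsed[k] += line.strip()' otherwise
def parseGoA : List String → PySem.Dict String String → Option String → PySem.Dict String String
  | [], d, _ => d
  | line :: rest, d, k =>
    if PySem.Str.startswith line "###" then
      let k' := pvHeaderKey line
      parseGoA rest (d.insert k' "") (some k')
    else
      match k with
      | none => parseGoA rest d none
      | some k => parseGoA rest (d.insert k (d.getD k "" ++ PySem.Str.strip line)) (some k)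

def parse_issue_body (body : String) : List (String × String) :=
  (parseGoA ((PySem.Str.split? body "\n").getD []) PySem.Dict.empty none).items

-- ===== PORT B =====
-- Source B's _sections: recurse on the line list; at a header, find the index of the next header
-- (next(...) with default = List.findIdx, which returns the length when absent), slice the
-- section's content lines out with rest[:end] / rest[end:] (end is in [0, len], so they are
-- exactly take/drop), and recurse on the remainder.
def pvSections : List String → List (String × String)
  | [] => []
  | first :: rest =>
    if PySem.Str.startswith first "###" then
      let e := rest.findIdx (fun l => PySem.Str.startswith l "###")
      (pvHeaderKey first, PySem.Str.join "" ((rest.take e).map PySem.Str.strip))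
        :: pvSections (rest.drop e)
    else
      pvSections rest
termination_by lines => lines.length
decreasing_by
  · simp only [List.length_drop, List.length_cons]; omega
  · simp only [List.length_cons]; omega

-- Source B's main loop: one dict assignment per section (last duplicate wins, first-seen position kept)
def parse_issue_body_alt (body : String) : List (String × String) :=
  ((pvSections ((PySem.Str.split? body "\n").getD [])).foldl
      (fun d kv => d.insert kv.1 kv.2) PySem.Dict.empty).items

-- ===== PRECONDITION & SPEC =====
def Spec_parse_issue_body (body : String) (out : List (String × String)) : Prop := out = parse_issue_body_alt body
instance (body : String) (out : List (String × String)) : Decidable (Spec_parse_issue_body body out) := by unfold Spec_parse_issue_body; infer_instance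

-- ===== CLAIM (what is proved, stated in full; the proofs are below) =====
def Claim_equal_parse_issue_body : Prop := ∀ (body : String), Dom_parse_issue_body body → Spec_parse_issue_body body (parse_issue_body body)

-- ===== LEMMAS AND PROOFS =====

-- one dict assignment per (key, value) pair (Source B's pass-2 step, eta-expanded)
def pvIns (d : PySem.Dict String String) (kv : String × String) : PySem.Dict String String :=
  d.insert kv.1 kv.2

-- A's dict after absorbing the pending section 'cur' (key, accumulated string)
def pvUpd (d : PySem.Dict String String) : Option (String × String) → PySem.Dict String String
  | none => d
  | some c => pvIns d c

-- intermediate, A-shaped section list: linewise recursion carrying the open section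
def secA : List String → Option (String × String) → List (String × String)
  | [], none => []
  | [], some c => [c]
  | line :: rest, cur =>
    if PySem.Str.startswith line "###" then
      cur.toList ++ secA rest (some (pvHeaderKey line, ""))
    else
      match cur with
      | none => secA rest none
      | some (k, s) => secA rest (some (k, s ++ PySem.Str.strip line))

theorem pv_str_append_empty (s : String) : s ++ "" = s := by
  apply String.toList_injective; simp

theorem pv_str_empty_append (s : String) : "" ++ s = s := by
  apply String.toList_injective; simp

theorem pv_str_append_assoc (a b c : String) : a ++ b ++ c = a ++ (b ++ c) := by
  apply String.toList_injective; simp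

theorem pv_join_nil : PySem.Str.join "" ([] : List String) = "" := rfl

theorem pv_cjoin_cons (x : List Char) (xs : List (List Char)) :
    PySem.Chars.join [] (x :: xs) = x ++ PySem.Chars.join [] xs := by
  cases xs with
  | nil => simp [PySem.Chars.join_singleton, PySem.Chars.join_nil]
  | cons b t => rw [PySem.Chars.join_cons_cons]; simp

theorem pv_join_cons (x : String) (xs : List String) :
    PySem.Str.join "" (x :: xs) = x ++ PySem.Str.join "" xs := by
  apply String.toList_injective
  simp [PySem.Str.join, pv_cjoin_cons]

-- A's loop equals a fold of pvIns over the A-shaped section list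
theorem pv_main (lines : List String) :
    ∀ (d : PySem.Dict String String) (cur : Option (String × String)),
      parseGoA lines (pvUpd d cur) (cur.map Prod.fst)
        = (secA lines cur).foldl pvIns d := by
  induction lines with
  | nil =>
    intro d cur
    cases cur <;> simp [parseGoA, secA, pvUpd]
  | cons line rest ih =>
    intro d cur
    by_cases h : PySem.Str.startswith line "###" = true
    · have hflush : (cur.toList).foldl pvIns d = pvUpd d cur := by
        cases cur <;> simp [pvUpd]
      have hstep : (pvUpd d cur).insert (pvHeaderKey line) ""
            = pvUpd (pvUpd d cur) (some (pvHeaderKey line, "")) := rfl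
      simp only [parseGoA, secA, h, if_pos, hstep]
      rw [List.foldl_append, hflush]
      exact ih (pvUpd d cur) (some (pvHeaderKey line, ""))
    · cases cur with
      | none =>
        simp only [parseGoA, secA, h, pvUpd, Option.map]
        exact ih d none
      | some c =>
        obtain ⟨k, s⟩ := c
        have hins : (pvUpd d (some (k, s))).insert k
              ((pvUpd d (some (k, s))).getD k "" ++ PySem.Str.strip line)
            = pvUpd d (some (k, s ++ PySem.Str.strip line)) := by
          simp [pvUpd, pvIns, PySem.Dict.getD_insert_self, PySem.Dict.insert_insert_self]
        simp only [parseGoA, secA, h, Option.map, hins]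
        exact ih d (some (k, s ++ PySem.Str.strip line))

-- with an open section, secA emits it with the content up to the next header appended
theorem secA_open (rest : List String) : ∀ (k s : String),
    secA rest (some (k, s))
      = (k, s ++ PySem.Str.join ""
            ((rest.take (rest.findIdx (fun l => PySem.Str.startswith l "###"))).map PySem.Str.strip))
        :: secA (rest.drop (rest.findIdx (fun l => PySem.Str.startswith l "###"))) none := by
  induction rest with
  | nil =>
    intro k s
    simp [secA, pv_join_nil]
  | cons r rest' ih =>
    intro k s
    by_cases h : PySem.Str.startswith r "###" = true
    · simp only [secA, h, if_pos, List.findIdx_cons, cond_true, Option.toList,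
        List.take_zero, List.drop_zero, List.map_nil, pv_join_nil, pv_str_append_empty]
      rfl
    · simp only [secA, h, if_neg, Bool.false_eq_true, not_false_iff, List.findIdx_cons,
        cond_false, List.take_succ_cons, List.drop_succ_cons, List.map_cons, pv_join_cons]
      rw [ih k (s ++ PySem.Str.strip r), pv_str_append_assoc]

-- with no open section, the A-shaped list equals Source B's recursive block splitter
theorem secA_none_eq : ∀ (n : Nat) (lines : List String), lines.length ≤ n →
    secA lines none = pvSections lines := by
  intro n
  induction n with
  | zero =>
    intro lines hl
    have : lines = [] := List.eq_nil_of_length_eq_zero (Nat.le_zero.mp hl)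
    subst this; simp [secA, pvSections]
  | succ m ih =>
    intro lines hl
    cases lines with
    | nil => simp [secA, pvSections]
    | cons first rest =>
      by_cases h : PySem.Str.startswith first "###" = true
      · have h' : PySem.Chars.startswith first.toList ['#', '#', '#'] = true := by
          simpa using h
        have h1 : secA (first :: rest) none = secA rest (some (pvHeaderKey first, "")) := by
          simp [secA, h']
        rw [h1, secA_open]
        rw [pvSections]
        simp only [h, if_pos]
        rw [pv_str_empty_append]
        congr 1
        exact ih _ (by
          have := List.length_drop
            (l := rest) (i := rest.findIdx (fun l => PySem.Str.startswith l "###"))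
          simp only [List.length_cons] at hl
          omega)
      · have h' : PySem.Chars.startswith first.toList ['#', '#', '#'] = false := by
          simpa using h
        have h1 : secA (first :: rest) none = secA rest none := by
          simp [secA, h']
        rw [h1, pvSections]
        simp only [h, if_neg, Bool.false_eq_true, not_false_iff]
        exact ih rest (by simp only [List.length_cons] at hl; omega)

-- ===== VERDICT (by name: the statement is the Claim_ definition above) =====
theorem parse_issue_body_spec : Claim_equal_parse_issue_body := by
  intro body _
  unfold Spec_parse_issue_body parse_issue_body parse_issue_body_alt
  have hmain := pv_main ((PySem.Str.split? body "\n").getD []) PySem.Dict.empty none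
  simp only [pvUpd, Option.map] at hmain
  rw [hmain, secA_none_eq ((PySem.Str.split? body "\n").getD []).length _ le_rfl]
  rfl
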